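-- pv_equiv track=rewrite | github.com/gyeomh/LEGO-EVAL | evaluation/functions.py | get_wall_list
-- ===== SOURCE A (Python) =====
-- def get_wall_list(scene: dict, room_list: list, sys_args) -> dict:
--     """
--     Returns a list of wall IDs from the given scene.
--     """
--     output = {}
--     for room in room_list:
--         output[room+'_wall_list'] = []
--     for wall in scene.get("walls", []):
--         if wall["roomId"] in room_list:
--             if 'exterior' not in wall['id']:
--                 output[wall["roomId"]+'_wall_list'].append(wall["id"])
--
--     return output
-- ===== SOURCE B (Python) =====
-- def get_wall_list(scene: dict, room_list: list, sys_args) -> dict: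
--     """
--     Returns a list of wall IDs from the given scene.
--     Per-room scans instead of A's two-phase distribute: each room's list is
--     computed independently by scanning the walls; a 'key not in output'
--     guard reproduces dict semantics on duplicate rooms.
--     """
--     walls = scene.get("walls", [])
--     output = {}
--     for room in room_list:
--         key = room + '_wall_list'
--         if key not in output:
--             ids = []
--             for wall in walls:
--                 if wall['roomId'] == room and 'exterior' not in wall['id']:
--                     ids.append(wall['id'])
--             output[key] = ids
--     return output
-- ===== Notes on version B (the rewrite author's own statement) =====
-- stated objective: alternative
-- what changed: Replaces A's two-phase distribute (initialise an empty list per room, then one pass over walls appending into the list keyed by each wall's roomId) with independent per-room scans of the walls, building each room's list directly and assembling the result room by room with a duplicate-key guard.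
import Mathlib
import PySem

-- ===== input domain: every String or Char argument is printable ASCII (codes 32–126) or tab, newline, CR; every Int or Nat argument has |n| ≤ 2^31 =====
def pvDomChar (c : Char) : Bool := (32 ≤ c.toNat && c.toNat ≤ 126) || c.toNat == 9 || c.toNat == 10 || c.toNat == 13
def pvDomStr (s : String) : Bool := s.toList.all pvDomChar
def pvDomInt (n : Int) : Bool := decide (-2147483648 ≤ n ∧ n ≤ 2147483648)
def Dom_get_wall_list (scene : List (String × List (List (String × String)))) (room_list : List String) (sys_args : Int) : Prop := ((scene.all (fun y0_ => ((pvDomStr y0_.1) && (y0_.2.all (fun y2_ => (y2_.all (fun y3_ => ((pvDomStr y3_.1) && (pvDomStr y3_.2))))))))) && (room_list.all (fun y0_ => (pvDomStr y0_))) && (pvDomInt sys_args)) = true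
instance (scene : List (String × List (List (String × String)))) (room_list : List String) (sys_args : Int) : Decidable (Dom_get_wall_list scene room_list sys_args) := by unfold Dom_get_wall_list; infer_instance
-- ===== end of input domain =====

-- B replaces A's two-phase distribute loop (init empty lists per room, then one pass over walls
-- appending into them) with independent per-room scans assembled room by room; objective: alternative.


-- ===== PORT A =====
-- output = {}; for room in room_list: output[room+'_wall_list'] = []
-- for wall in scene.get("walls", []):
--   if wall["roomId"] in room_list:
--     if 'exterior' not in wall['id']: output[wall["roomId"]+'_wall_list'].append(wall["id"])
-- A 'none' lookup is Python's KeyError on "roomId"/"id"; there the step keeps the dict — such inputs are excluded by Pre_.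
def get_wall_list (scene : List (String × List (List (String × String)))) (room_list : List String) (sys_args : Int) : List (String × List String) :=
  let output0 : PySem.Dict String (List String) :=
    room_list.foldl (fun d room => d.insert (room ++ "_wall_list") []) PySem.Dict.empty
  let walls := (PySem.Dict.mk scene).getD "walls" []
  (walls.foldl (fun d wall =>
    match (PySem.Dict.mk wall).get? "roomId" with
    | none => d            -- Python raises KeyError here (outside Pre_)
    | some rid =>
      if rid ∈ room_list then
        match (PySem.Dict.mk wall).get? "id" with
        | none => d        -- Python raises KeyError here (outside Pre_)
        | some wid =>
          if PySem.Str.isIn "exterior" wid then d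
          else d.modify (rid ++ "_wall_list") [] (fun l => l ++ [wid])
      else d) output0).items

-- ===== PORT B =====
-- ids = []; for wall in walls: if wall['roomId'] == room and 'exterior' not in wall['id']: ids.append(wall['id'])
def pvRoomWalls (room : String) : List (List (String × String)) → List String
  | [] => []
  | wall :: rest =>
    match (PySem.Dict.mk wall).get? "roomId" with
    | none => pvRoomWalls room rest      -- Python raises KeyError here (outside Pre_)
    | some rid =>
      if rid = room then
        match (PySem.Dict.mk wall).get? "id" with
        | none => pvRoomWalls room rest  -- Python raises KeyError here (outside Pre_)
        | some wid =>
          if PySem.Str.isIn "exterior" wid then pvRoomWalls room rest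
          else wid :: pvRoomWalls room rest
      else pvRoomWalls room rest

-- output = {}; for room in room_list: key = room+'_wall_list'; if key not in output: output[key] = <per-room scan>
-- the result dict is built directly as an insertion-order association list, 'seen' being its key set
def pvAssemble (walls : List (List (String × String))) : List String → List String → List (String × List String)
  | [], _ => []
  | room :: rest, seen =>
    let key := room ++ "_wall_list"
    if key ∈ seen then pvAssemble walls rest seen
    else (key, pvRoomWalls room walls) :: pvAssemble walls rest (key :: seen)

def get_wall_list_alt (scene : List (String × List (List (String × String)))) (room_list : List String) (sys_args : Int) : List (String × List String) :=
  pvAssemble ((PySem.Dict.mk scene).getD "walls" []) room_list []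

-- ===== PRECONDITION & SPEC =====
-- Pre_ excludes exactly the inputs on which A raises KeyError: a wall without the "roomId" key,
-- or a wall whose roomId is in room_list but which lacks the "id" key.
def Pre_get_wall_list (scene : List (String × List (List (String × String)))) (room_list : List String) (sys_args : Int) : Prop :=
  ∀ wall ∈ (PySem.Dict.mk scene).getD "walls" ([] : List (List (String × String))),
    ((PySem.Dict.mk wall).get? "roomId").isSome = true ∧
    (((PySem.Dict.mk wall).get? "roomId").getD "" ∈ room_list →
      ((PySem.Dict.mk wall).get? "id").isSome = true)
instance (scene : List (String × List (List (String × String)))) (room_list : List String) (sys_args : Int) : Decidable (Pre_get_wall_list scene room_list sys_args) := by unfold Pre_get_wall_list; infer_instance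

def pvWitness_get_wall_list : (List (String × List (List (String × String)))) × List String × Int :=
  ([("walls", [[("roomId", "a"), ("id", "a_w1")], [("roomId", "a"), ("id", "exterior_1")], [("roomId", "b"), ("id", "b_w1")]])], ["a", "b"], 0)

def Spec_get_wall_list (scene : List (String × List (List (String × String)))) (room_list : List String) (sys_args : Int) (out : List (String × List String)) : Prop := out = get_wall_list_alt scene room_list sys_args
instance (scene : List (String × List (List (String × String)))) (room_list : List String) (sys_args : Int) (out : List (String × List String)) : Decidable (Spec_get_wall_list scene room_list sys_args out) := by unfold Spec_get_wall_list; infer_instance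

-- ===== CLAIM (what is proved, stated in full; the proofs are below) =====
def Claim_equal_get_wall_list : Prop := ∀ (scene : List (String × List (List (String × String)))) (room_list : List String) (sys_args : Int), Dom_get_wall_list scene room_list sys_args → Pre_get_wall_list scene room_list sys_args → Spec_get_wall_list scene room_list sys_args (get_wall_list scene room_list sys_args)

-- ===== LEMMAS AND PROOFS =====
def pvKey (r : String) : String := r ++ "_wall_list"

theorem pv_key_inj (a b : String) (h : pvKey a = pvKey b) : a = b := by
  have h2 := congrArg String.toList h
  simp [pvKey] at h2
  exact String.toList_injective h2

def pvStepA (room_list : List String) (d : PySem.Dict String (List String)) (wall : List (String × String)) : PySem.Dict String (List String) :=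
  match (PySem.Dict.mk wall).get? "roomId" with
  | none => d
  | some rid =>
    if rid ∈ room_list then
      match (PySem.Dict.mk wall).get? "id" with
      | none => d
      | some wid =>
        if PySem.Str.isIn "exterior" wid then d
        else d.modify (rid ++ "_wall_list") [] (fun l => l ++ [wid])
    else d

def pvPickB (room : String) (wall : List (String × String)) : Option String :=
  match (PySem.Dict.mk wall).get? "roomId" with
  | none => none
  | some rid =>
    if rid = room then
      match (PySem.Dict.mk wall).get? "id" with
      | none => none
      | some wid => if PySem.Str.isIn "exterior" wid then none else some wid
    else none

def pvWallPre (room_list : List String) (wall : List (String × String)) : Prop :=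
  ((PySem.Dict.mk wall).get? "roomId").isSome = true ∧
  (((PySem.Dict.mk wall).get? "roomId").getD "" ∈ room_list →
    ((PySem.Dict.mk wall).get? "id").isSome = true)

-- B-side: what an insert fold keyed by pvKey holds at pvKey r
theorem pvB_get? (val : String → List String) (r : String) :
    ∀ (l : List String) (d : PySem.Dict String (List String)),
    (r ∈ l ∨ d.get? (pvKey r) = some (val r)) →
    (l.foldl (fun d x => d.insert (pvKey x) (val x)) d).get? (pvKey r) = some (val r) := by
  intro l
  induction l with
  | nil =>
    intro d h
    simp only [List.foldl_nil]
    rcases h with h | h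
    · simp at h
    · exact h
  | cons x l' ih =>
    intro d h
    simp only [List.foldl_cons]
    apply ih
    by_cases hx : pvKey x = pvKey r
    · right
      have hxr : x = r := pv_key_inj _ _ hx
      subst hxr
      simp [PySem.Dict.get?_insert_self]
    · rcases h with h | h
      · rcases List.mem_cons.mp h with h | h
        · exact absurd (congrArg pvKey h.symm) hx
        · exact Or.inl h
      · right
        rw [PySem.Dict.get?_insert_of_ne _ _ (fun he => hx he.symm)]
        exact h

-- A-side: keys are unchanged by the distribute fold
theorem pvA_keys (room_list : List String) :
    ∀ (walls : List (List (String × String))) (d : PySem.Dict String (List String)),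
    (∀ s ∈ room_list, d.contains (pvKey s) = true) →
    (walls.foldl (pvStepA room_list) d).keys = d.keys := by
  intro walls
  induction walls with
  | nil => intro d _; rfl
  | cons w ws ih =>
    intro d hc
    simp only [List.foldl_cons]
    have hstep : (pvStepA room_list d w).keys = d.keys ∧
        (∀ s ∈ room_list, (pvStepA room_list d w).contains (pvKey s) = true) := by
      unfold pvStepA
      cases hrid : (PySem.Dict.mk w).get? "roomId" with
      | none => exact ⟨rfl, hc⟩
      | some rid =>
        dsimp only
        by_cases hmem : rid ∈ room_list
        · simp only [hmem, if_true]
          cases hid : (PySem.Dict.mk w).get? "id" with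
          | none => exact ⟨rfl, fun s hs => hc s hs⟩
          | some wid =>
            dsimp only
            split_ifs with hext
            · exact ⟨rfl, hc⟩
            · constructor
              · rw [PySem.Dict.keys_modify]
                exact PySem.Dict.keys_insert_of_contains _ _ (hc rid hmem)
              · intro s hs
                rw [PySem.Dict.contains_modify]
                simp [hc s hs]
        · rw [if_neg hmem]
          exact ⟨rfl, hc⟩
    rw [ih _ hstep.2, hstep.1]

-- A-side: value at key r after the distribute fold
theorem pvA_getD (room_list : List String) (r : String) (hr : r ∈ room_list) :
    ∀ (walls : List (List (String × String))) (d : PySem.Dict String (List String)),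
    (∀ wall ∈ walls, pvWallPre room_list wall) →
    (walls.foldl (pvStepA room_list) d).getD (pvKey r) [] =
      d.getD (pvKey r) [] ++ walls.filterMap (pvPickB r) := by
  intro walls
  induction walls with
  | nil => intro d _; simp
  | cons w ws ih =>
    intro d hpre
    have hw := hpre w (List.mem_cons_self ..)
    have hws : ∀ wall ∈ ws, pvWallPre room_list wall := fun wall h => hpre wall (List.mem_cons_of_mem _ h)
    simp only [List.foldl_cons, List.filterMap_cons]
    obtain ⟨hsome, hid⟩ := hw
    cases hrid : (PySem.Dict.mk w).get? "roomId" with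
    | none => rw [hrid] at hsome; simp at hsome
    | some rid =>
      have hstep : pvStepA room_list d w =
          (if rid ∈ room_list then
            match (PySem.Dict.mk w).get? "id" with
            | none => d
            | some wid =>
              if PySem.Str.isIn "exterior" wid then d
              else d.modify (rid ++ "_wall_list") [] (fun l => l ++ [wid])
          else d) := by unfold pvStepA; rw [hrid]
      have hpick : pvPickB r w =
          (if rid = r then
            match (PySem.Dict.mk w).get? "id" with
            | none => none
            | some wid => if PySem.Str.isIn "exterior" wid then none else some wid
          else none) := by unfold pvPickB; rw [hrid]
      by_cases hmem : rid ∈ room_list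
      · rw [hrid] at hid
        simp only [Option.getD_some] at hid
        cases hidv : (PySem.Dict.mk w).get? "id" with
        | none =>
          rw [hidv] at hid
          simp [hmem] at hid
        | some wid =>
          rw [hstep, hpick]
          simp only [hmem, if_true, hidv]
          by_cases hrr : rid = r
          · subst hrr
            simp only [if_true]
            split_ifs with hext
            · rw [ih _ hws]
            · rw [ih _ hws]
              rw [show rid ++ "_wall_list" = pvKey rid from rfl,
                PySem.Dict.getD_modify_self]
              simp
          · simp only [hrr, if_false]
            split_ifs with hext
            · rw [ih _ hws]
            · rw [ih _ hws]
              have hne : pvKey r ≠ pvKey rid := fun he => hrr ((pv_key_inj _ _ he).symm)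
              rw [show rid ++ "_wall_list" = pvKey rid from rfl,
                PySem.Dict.getD_modify, if_neg hne]
      · have hrr : rid ≠ r := fun he => hmem (he ▸ hr)
        rw [hstep, hpick]
        simp only [hmem, if_false, hrr]
        rw [ih _ hws]

-- A's result equals the per-room insert fold (dict form of B's values)
theorem pv_main_dict (scene : List (String × List (List (String × String)))) (room_list : List String) (sys_args : Int)
    (hpre : ∀ wall ∈ (PySem.Dict.mk scene).getD "walls" ([] : List (List (String × String))), pvWallPre room_list wall) :
    get_wall_list scene room_list sys_args =
      (room_list.foldl (fun d room =>
        d.insert (pvKey room) (((PySem.Dict.mk scene).getD "walls" []).filterMap (pvPickB room)))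
        PySem.Dict.empty).items := by
  have hA : get_wall_list scene room_list sys_args =
      (((PySem.Dict.mk scene).getD "walls" []).foldl (pvStepA room_list)
        (room_list.foldl (fun d room => d.insert (pvKey room) []) PySem.Dict.empty)).items := rfl
  rw [hA]
  set walls := (PySem.Dict.mk scene).getD "walls" ([] : List (List (String × String))) with hwalls
  set d0 := room_list.foldl (fun d room => d.insert (pvKey room) ([] : List String)) PySem.Dict.empty with hd0
  set dB := room_list.foldl (fun d room => d.insert (pvKey room) (walls.filterMap (pvPickB room))) PySem.Dict.empty with hdB
  set dA := walls.foldl (pvStepA room_list) d0 with hdA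
  have hk0 : d0.keys = PySem.Set.update [] (room_list.map pvKey) := by
    rw [hd0, PySem.Dict.keys_foldl_insert_key room_list pvKey (fun _ _ => []) PySem.Dict.empty,
      PySem.Dict.keys_empty]
  have hkB : dB.keys = PySem.Set.update [] (room_list.map pvKey) := by
    rw [hdB, PySem.Dict.keys_foldl_insert_key room_list pvKey
      (fun _ room => walls.filterMap (pvPickB room)) PySem.Dict.empty, PySem.Dict.keys_empty]
  have hc0 : ∀ s ∈ room_list, d0.contains (pvKey s) = true := by
    intro s hs
    rw [PySem.Dict.contains_eq_decide_mem_keys, hk0, PySem.Set.update_nil_left]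
    simp only [decide_eq_true_eq, PySem.Set.mem_ofList, List.mem_map]
    exact ⟨s, hs, rfl⟩
  have hkA : dA.keys = d0.keys := pvA_keys room_list walls d0 hc0
  have hnd0 : d0.keys.Nodup := by
    rw [hd0]; exact PySem.Dict.nodup_keys_foldl_insert_key room_list pvKey _ _ PySem.Dict.nodup_keys_empty
  have hndB : dB.keys.Nodup := by
    rw [hdB]; exact PySem.Dict.nodup_keys_foldl_insert_key room_list pvKey _ _ PySem.Dict.nodup_keys_empty
  have hndA : dA.keys.Nodup := hkA ▸ hnd0
  rw [PySem.Dict.items_eq_map_keys dA hndA [], PySem.Dict.items_eq_map_keys dB hndB [],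
    show dA.keys = dB.keys from hkA.trans (hk0.trans hkB.symm)]
  apply List.map_congr_left
  intro k hk
  rw [hkB, PySem.Set.update_nil_left] at hk
  obtain ⟨r, hr, hkr⟩ := List.mem_map.mp ((PySem.Set.mem_ofList _ _).mp hk)
  subst hkr
  have hA0 : d0.get? (pvKey r) = some [] := by
    rw [hd0]; exact pvB_get? (fun _ => []) r room_list PySem.Dict.empty (Or.inl hr)
  have h1 : dA.getD (pvKey r) [] = [] ++ walls.filterMap (pvPickB r) := by
    rw [hdA, pvA_getD room_list r hr walls d0 hpre, PySem.Dict.getD_of_get?_eq_some _ _ hA0]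
  have h2 : dB.getD (pvKey r) [] = walls.filterMap (pvPickB r) := by
    rw [hdB]
    exact PySem.Dict.getD_of_get?_eq_some _ _
      (pvB_get? (fun room => walls.filterMap (pvPickB room)) r room_list PySem.Dict.empty (Or.inl hr))
  rw [h1, h2, List.nil_append]

-- the per-room scan computes the filterMap of the picker
theorem pvRoomWalls_eq (room : String) (walls : List (List (String × String))) :
    pvRoomWalls room walls = walls.filterMap (pvPickB room) := by
  induction walls with
  | nil => rfl
  | cons w ws ih =>
    simp only [List.filterMap_cons, pvRoomWalls]
    rw [show pvPickB room w = (match (PySem.Dict.mk w).get? "roomId" with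
        | none => none
        | some rid =>
          if rid = room then
            match (PySem.Dict.mk w).get? "id" with
            | none => none
            | some wid => if PySem.Str.isIn "exterior" wid then none else some wid
          else none) from rfl]
    cases (PySem.Dict.mk w).get? "roomId" with
    | none => exact ih
    | some rid =>
      dsimp only
      split_ifs with h1
      · cases (PySem.Dict.mk w).get? "id" with
        | none => exact ih
        | some wid =>
          dsimp only
          split_ifs with h2
          · exact ih
          · exact congrArg (wid :: ·) ih
      · exact ih

-- pvAssemble only depends on the membership of 'seen'
theorem pvAssemble_congr (walls : List (List (String × String))) :
    ∀ (rooms : List String) (s1 s2 : List String),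
    (∀ k : String, k ∈ s1 ↔ k ∈ s2) →
    pvAssemble walls rooms s1 = pvAssemble walls rooms s2 := by
  intro rooms
  induction rooms with
  | nil => intro s1 s2 _; rfl
  | cons room rest ih =>
    intro s1 s2 hs
    unfold pvAssemble
    by_cases h1 : room ++ "_wall_list" ∈ s1
    · rw [if_pos h1, if_pos ((hs _).mp h1)]
      exact ih s1 s2 hs
    · rw [if_neg h1, if_neg (fun h => h1 ((hs _).mpr h))]
      have : ∀ k : String, k ∈ (room ++ "_wall_list") :: s1 ↔ k ∈ (room ++ "_wall_list") :: s2 := by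
        intro k; simp only [List.mem_cons]; rw [hs k]
      rw [ih _ _ this]

-- the per-room insert fold's items are exactly what pvAssemble builds
theorem pv_fold_items (walls : List (List (String × String))) :
    ∀ (rooms : List String) (d : PySem.Dict String (List String)),
    d.keys.Nodup →
    (∀ r : String, pvKey r ∈ d.keys → d.get? (pvKey r) = some (walls.filterMap (pvPickB r))) →
    (rooms.foldl (fun d room => d.insert (pvKey room) (walls.filterMap (pvPickB room))) d).items
      = d.items ++ pvAssemble walls rooms d.keys := by
  intro rooms
  induction rooms with
  | nil => intro d _ _; simp [pvAssemble]
  | cons room rest ih =>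
    intro d hnd hval
    simp only [List.foldl_cons]
    unfold pvAssemble
    by_cases hc : pvKey room ∈ d.keys
    · have hcc : d.contains (pvKey room) = true := by
        rw [PySem.Dict.contains_eq_decide_mem_keys]; simpa using hc
      have hget : d.get? (pvKey room) = some (walls.filterMap (pvPickB room)) := hval room hc
      have hins : d.insert (pvKey room) (walls.filterMap (pvPickB room)) = d := by
        apply PySem.Dict.ext
        rw [PySem.Dict.items_insert_of_contains _ _ hcc]
        have hfix : ∀ p ∈ d.items, (if p.1 == pvKey room then (pvKey room, walls.filterMap (pvPickB room)) else p) = p := by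
          intro p hp
          obtain ⟨pk, pv⟩ := p
          by_cases hpk : pk = pvKey room
          · have hgp : d.get? pk = some pv := PySem.Dict.get?_of_mem_items d hp hnd
            rw [hpk, hget] at hgp
            have hv := Option.some.inj hgp
            simp [hpk, hv]
          · simp [hpk]
        rw [List.map_congr_left hfix]
        simp
      have hc' : room ++ "_wall_list" ∈ d.keys := hc
      rw [hins, if_pos hc']
      exact ih d hnd hval
    · have hcc : d.contains (pvKey room) = false := by
        rw [PySem.Dict.contains_eq_decide_mem_keys]; simpa using hc
      have hkeys : (d.insert (pvKey room) (walls.filterMap (pvPickB room))).keys = d.keys ++ [pvKey room] :=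
        PySem.Dict.keys_insert_of_not_contains _ _ hcc
      have hitems : (d.insert (pvKey room) (walls.filterMap (pvPickB room))).items
          = d.items ++ [(pvKey room, walls.filterMap (pvPickB room))] :=
        PySem.Dict.items_insert_of_not_contains _ _ hcc
      have hnd' : (d.insert (pvKey room) (walls.filterMap (pvPickB room))).keys.Nodup := by
        rw [hkeys, List.nodup_append]
        refine ⟨hnd, List.nodup_singleton _, ?_⟩
        intro a ha b hb hab
        rw [List.mem_singleton.mp hb] at hab
        exact hc (hab ▸ ha)
      have hval' : ∀ r : String, pvKey r ∈ (d.insert (pvKey room) (walls.filterMap (pvPickB room))).keys →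
          (d.insert (pvKey room) (walls.filterMap (pvPickB room))).get? (pvKey r) = some (walls.filterMap (pvPickB r)) := by
        intro r hr
        by_cases hrk : pvKey r = pvKey room
        · have : r = room := pv_key_inj _ _ hrk
          subst this
          exact PySem.Dict.get?_insert_self _ _ _
        · rw [PySem.Dict.get?_insert_of_ne _ _ hrk]
          rw [hkeys] at hr
          rcases List.mem_append.mp hr with hr | hr
          · exact hval r hr
          · simp only [List.mem_singleton] at hr
            exact absurd hr hrk
      have hc' : ¬ room ++ "_wall_list" ∈ d.keys := hc
      rw [ih _ hnd' hval', hitems, hkeys, if_neg hc']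
      rw [pvAssemble_congr walls rest (d.keys ++ [pvKey room]) ((room ++ "_wall_list") :: d.keys)
        (by intro k; simp [pvKey, List.mem_cons, List.mem_append, or_comm])]
      simp [pvKey, pvRoomWalls_eq]

theorem pv_main (scene : List (String × List (List (String × String)))) (room_list : List String) (sys_args : Int)
    (hpre : ∀ wall ∈ (PySem.Dict.mk scene).getD "walls" ([] : List (List (String × String))), pvWallPre room_list wall) :
    get_wall_list scene room_list sys_args = get_wall_list_alt scene room_list sys_args := by
  rw [pv_main_dict scene room_list sys_args hpre]
  have hE : (PySem.Dict.empty : PySem.Dict String (List String)).keys = [] := PySem.Dict.keys_empty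
  have := pv_fold_items ((PySem.Dict.mk scene).getD "walls" []) room_list PySem.Dict.empty
    (by rw [hE]; exact List.nodup_nil) (by intro r hr; rw [hE] at hr; simp at hr)
  rw [this, hE]
  show _ ++ _ = _
  rw [show (PySem.Dict.empty : PySem.Dict String (List String)).items = [] from rfl, List.nil_append]
  rfl

-- ===== VERDICT (by name: the statement is the Claim_ definition above) =====
theorem get_wall_list_spec : Claim_equal_get_wall_list := by
  intro scene room_list sys_args _ hpre
  unfold Spec_get_wall_list
  exact pv_main scene room_list sys_args hpre
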